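-- pv_equiv track=rewrite | github.com/idilsuerdenlig/hierarchical_thesis | src/pick_last_ep_dataset.py | pick_last_ep
-- ===== SOURCE A (Python) =====
-- def pick_last_ep(dataset):
--
--     ep_end_indices = list()
--     for i, dataset_step in enumerate(dataset):
--         if dataset_step[-1]:
--             ep_end_indices.append(i)
--
--     last_ep_begin = ep_end_indices[-2]
--     last_ep_end = ep_end_indices[-1]
--     return dataset[last_ep_begin:last_ep_end+1]
-- ===== SOURCE B (Python) =====
-- def pick_last_ep(dataset):
--     # Reverse early-exit scan: find the last two episode-end flags from the back
--     # and slice immediately, instead of collecting all end indices forward.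
--     last_ep_end = None
--     for i in range(len(dataset) - 1, -1, -1):
--         if dataset[i][-1]:
--             if last_ep_end is None:
--                 last_ep_end = i
--             else:
--                 return dataset[i:last_ep_end + 1]
--     raise IndexError("list index out of range")
-- ===== Notes on version B (the rewrite author's own statement) =====
-- stated objective: alternative
-- what changed: B scans the dataset backwards with an early exit, returning as soon as the last two episode-end flags are found, instead of A's full forward pass that collects every end index and then indexes [-2]/[-1].
import Mathlib
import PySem

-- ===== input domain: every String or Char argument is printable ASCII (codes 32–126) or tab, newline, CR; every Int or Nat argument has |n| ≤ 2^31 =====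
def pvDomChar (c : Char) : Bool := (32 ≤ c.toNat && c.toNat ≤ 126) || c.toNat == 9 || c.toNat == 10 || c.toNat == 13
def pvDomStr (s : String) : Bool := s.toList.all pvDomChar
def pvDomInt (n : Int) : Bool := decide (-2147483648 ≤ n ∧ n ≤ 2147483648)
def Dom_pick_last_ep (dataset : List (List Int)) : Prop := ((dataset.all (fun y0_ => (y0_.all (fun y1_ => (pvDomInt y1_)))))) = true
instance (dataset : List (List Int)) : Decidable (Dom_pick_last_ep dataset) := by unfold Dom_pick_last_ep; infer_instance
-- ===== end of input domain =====

-- B replaces A's full forward collect-all-end-indices pass by a backward scan with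
-- early exit at the second-to-last episode-end flag (objective: alternative).

-- ===== PORT A =====
def pick_last_ep (dataset : List (List Int)) : List (List Int) :=
  let ep_end_indices : List Int :=
    (PySem.List.enumerate dataset).foldl
      (fun acc p => if ((PySem.List.pyGet? p.2 (-1)).getD 0) != 0 then acc ++ [p.1] else acc) []
  match PySem.List.pyGet? ep_end_indices (-2), PySem.List.pyGet? ep_end_indices (-1) with
  | some last_ep_begin, some last_ep_end =>
      PySem.List.slice dataset (some last_ep_begin) (some (last_ep_end + 1))
  | _, _ => []  -- IndexError on ep_end_indices[-2] / [-1]; excluded by Pre_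

-- ===== PORT B =====
-- backward loop 'for i in range(len(dataset)-1, -1, -1)': i+1 is the current counter
def pick_last_ep_altGo (dataset : List (List Int)) : Nat → Option Nat → List (List Int)
  | 0, _ => []  -- fell off the loop: raise IndexError; excluded by Pre_
  | i + 1, last_ep_end =>
      if ((PySem.List.pyGet? (PySem.List.pyGetD dataset (i : Int) []) (-1)).getD 0) != 0 then
        match last_ep_end with
        | none => pick_last_ep_altGo dataset i (some i)
        | some e => PySem.List.slice dataset (some (i : Int)) (some ((e : Int) + 1))
      else
        pick_last_ep_altGo dataset i last_ep_end

def pick_last_ep_alt (dataset : List (List Int)) : List (List Int) :=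
  pick_last_ep_altGo dataset dataset.length none

-- ===== PRECONDITION & SPEC =====
-- Pre_ excludes exactly the inputs where A raises IndexError: a dataset containing an
-- empty step (dataset_step[-1] raises), or fewer than two steps with a truthy last flag
-- (ep_end_indices[-2] / [-1] raises).
def Pre_pick_last_ep (dataset : List (List Int)) : Prop :=
  (∀ r ∈ dataset, r ≠ []) ∧
  2 ≤ dataset.countP (fun r => (r.getLastD 0) != 0)
instance (dataset : List (List Int)) : Decidable (Pre_pick_last_ep dataset) := by
  unfold Pre_pick_last_ep; infer_instance

def pvWitness_pick_last_ep : List (List Int) := [[0, 1], [2, 0], [3]]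

def Spec_pick_last_ep (dataset : List (List Int)) (out : List (List Int)) : Prop := out = pick_last_ep_alt dataset
instance (dataset : List (List Int)) (out : List (List Int)) : Decidable (Spec_pick_last_ep dataset out) := by unfold Spec_pick_last_ep; infer_instance

-- ===== CLAIM (what is proved, stated in full; the proofs are below) =====
def Claim_equal_pick_last_ep : Prop := ∀ (dataset : List (List Int)), Dom_pick_last_ep dataset → Pre_pick_last_ep dataset → Spec_pick_last_ep dataset (pick_last_ep dataset)

-- ===== LEMMAS AND PROOFS =====

-- the truthiness test both ports apply to a step
def pvFlag (r : List Int) : Bool := ((PySem.List.pyGet? r (-1)).getD 0) != 0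

-- flagged indices among the first i steps, in increasing order
def pvIdxs (dataset : List (List Int)) (i : Nat) : List Nat :=
  (List.range i).filter (fun j => pvFlag (dataset.getD j []))

lemma pvIdxs_succ (dataset : List (List Int)) (i : Nat) :
    pvIdxs dataset (i + 1) =
      pvIdxs dataset i ++ (if pvFlag (dataset.getD i []) then [i] else []) := by
  simp only [pvIdxs, List.range_succ, List.filter_append, List.filter_cons, List.filter_nil]

lemma altGo_succ (dataset : List (List Int)) (i : Nat) (le : Option Nat) :
    pick_last_ep_altGo dataset (i + 1) le =
      if pvFlag (dataset.getD i []) then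
        (match le with
         | none => pick_last_ep_altGo dataset i (some i)
         | some e => PySem.List.slice dataset (some (i : Int)) (some ((e : Int) + 1)))
      else pick_last_ep_altGo dataset i le := by
  simp only [pick_last_ep_altGo, pvFlag, PySem.List.pyGetD_natCast]
  split <;> rfl

-- B's inner loop with a remembered end returns the slice from the last flagged index below i
lemma altGo_some (dataset : List (List Int)) (i : Nat) (e : Nat) :
    pick_last_ep_altGo dataset i (some e) =
      match (pvIdxs dataset i).reverse with
      | a :: _ => PySem.List.slice dataset (some (a : Int)) (some ((e : Int) + 1))
      | [] => [] := by
  induction i with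
  | zero => simp [pick_last_ep_altGo, pvIdxs]
  | succ i ih =>
      rw [altGo_succ, pvIdxs_succ]
      cases hf : pvFlag (dataset.getD i []) with
      | true => simp
      | false => simpa using ih

-- B's loop returns the slice between the last two flagged indices below i
lemma altGo_none (dataset : List (List Int)) (i : Nat) :
    pick_last_ep_altGo dataset i none =
      match (pvIdxs dataset i).reverse with
      | b :: a :: _ => PySem.List.slice dataset (some (a : Int)) (some ((b : Int) + 1))
      | _ => [] := by
  induction i with
  | zero => simp [pick_last_ep_altGo, pvIdxs]
  | succ i ih =>
      rw [altGo_succ, pvIdxs_succ]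
      cases hf : pvFlag (dataset.getD i []) with
      | true =>
          rw [if_pos rfl, altGo_some]
          rcases hr : (pvIdxs dataset i).reverse with _ | ⟨c, tl⟩ <;> simp [hr]
      | false => simpa using ih

-- A's collected end-index list is the flagged-index list of the whole dataset, as Ints
lemma epsA_eq (dataset : List (List Int)) :
    (PySem.List.enumerate dataset).foldl
      (fun acc p => if ((PySem.List.pyGet? p.2 (-1)).getD 0) != 0 then acc ++ [p.1] else acc) [] =
      (pvIdxs dataset dataset.length).map Int.ofNat := by
  rw [PySem.List.foldl_append_if
        (p := fun (q : Int × List Int) => ((PySem.List.pyGet? q.2 (-1)).getD 0) != 0)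
        (f := Prod.fst)]
  rw [PySem.List.enumerate_eq_map_pyRange dataset []]
  rw [show PySem.List.len dataset = ((dataset.length : Nat) : Int) from by
        simp [PySem.List.len]]
  rw [PySem.List.pyRange_zero_natCast]
  rw [List.map_map, List.filter_map, List.map_map, List.nil_append]
  unfold pvIdxs
  rw [List.filter_congr (q := fun j => pvFlag (dataset.getD j []))
      (by intro j _; simp [pvFlag, Function.comp, PySem.List.pyGetD_natCast])]
  exact List.map_congr_left (fun x _ => rfl)

-- both ports compute the same slice, on every input
lemma ports_eq (dataset : List (List Int)) :
    pick_last_ep dataset = pick_last_ep_alt dataset := by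
  unfold pick_last_ep pick_last_ep_alt
  dsimp only
  rw [epsA_eq, altGo_none]
  rcases hL : (pvIdxs dataset dataset.length).reverse with _ | ⟨b, _ | ⟨a, rest⟩⟩
  · have h0 : pvIdxs dataset dataset.length = [] := by
      simpa using congrArg List.reverse hL
    simp [h0, PySem.List.pyGet?]
  · have h1 : pvIdxs dataset dataset.length = [b] := by
      simpa using congrArg List.reverse hL
    have hnone : PySem.List.pyGet? [((b : Nat) : Int)] (-2) = none := by
      rw [PySem.List.pyGet?_eq_none_iff]
      simp [PySem.Raise.InRange]
    rw [h1]
    simp only [List.map_cons, List.map_nil, Int.ofNat_eq_natCast]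
    rw [hnone]
  · have hLL : pvIdxs dataset dataset.length = rest.reverse ++ [a, b] := by
      simpa using congrArg List.reverse hL
    rw [hLL]
    have hmap : (rest.reverse ++ [a, b]).map Int.ofNat =
        (rest.reverse.map Int.ofNat ++ [Int.ofNat a]) ++ [Int.ofNat b] := by simp
    rw [hmap, PySem.List.pyGet?_neg_one_append_singleton]
    rw [PySem.List.pyGet?_neg_ofNat _ 2 (by omega) (by simp)]
    have hlen : ((rest.reverse.map Int.ofNat ++ [Int.ofNat a]) ++ [Int.ofNat b]).length - 2
        = (rest.reverse.map Int.ofNat).length := by simp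
    rw [hlen, List.append_assoc, List.getElem?_append_right (le_refl _)]
    simp [Int.ofNat_eq_natCast]

-- ===== VERDICT (by name: the statement is the Claim_ definition above) =====
theorem pick_last_ep_spec : Claim_equal_pick_last_ep := by
  intro dataset _ _
  unfold Spec_pick_last_ep
  exact ports_eq dataset
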